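-- pv_equiv track=rewrite | github.com/dshemetov/leetcode | python/p1703.py | get_gaps
-- ===== SOURCE A (Python) =====
-- def get_gaps(nums: list[int]) -> list[int]:
--     gaps = []
--     prev = -1
--     for i, x in enumerate(nums):
--         if prev == -1 and x == 1:
--             prev = i
--         elif prev != -1 and x == 1:
--             gaps.append(i - prev)
--             prev = i
--     return gaps
-- ===== SOURCE B (Python) =====
-- def get_gaps(nums: list[int]) -> list[int]:
--     pos = [i for i, x in enumerate(nums) if x == 1]
--     return [b - a for a, b in zip(pos, pos[1:])]
-- ===== Notes on version B (the rewrite author's own statement) =====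
-- stated objective: simpler
-- what changed: Replaces the single scan with a prev sentinel and two-branch state machine by collecting the indices of ones and taking consecutive differences with zip.
import Mathlib
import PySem

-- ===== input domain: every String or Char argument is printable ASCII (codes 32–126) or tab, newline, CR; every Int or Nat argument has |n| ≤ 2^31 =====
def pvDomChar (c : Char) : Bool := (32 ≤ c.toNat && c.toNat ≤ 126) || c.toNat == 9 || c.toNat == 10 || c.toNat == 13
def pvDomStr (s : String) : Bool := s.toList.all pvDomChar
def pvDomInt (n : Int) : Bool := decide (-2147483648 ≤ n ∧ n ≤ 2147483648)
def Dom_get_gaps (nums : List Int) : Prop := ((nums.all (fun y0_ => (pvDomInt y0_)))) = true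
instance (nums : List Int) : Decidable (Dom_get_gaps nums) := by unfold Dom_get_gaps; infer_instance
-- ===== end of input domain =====

-- B collects the indices of ones and takes consecutive differences, replacing A's prev-sentinel state machine.

-- ===== PORT A =====
-- loop body of A: state (gaps, prev), item (i, x)
def pvStepA (st : List Int × Int) (ix : Int × Int) : List Int × Int :=
  if st.2 == -1 && ix.2 == 1 then (st.1, ix.1)
  else if !(st.2 == -1) && ix.2 == 1 then (st.1 ++ [ix.1 - st.2], ix.1)
  else st

def get_gaps (nums : List Int) : List Int :=
  ((PySem.List.enumerate nums 0).foldl pvStepA ([], -1)).1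

-- ===== PORT B =====
-- pos = [i for i, x in enumerate(nums) if x == 1]
def pvPosB (nums : List Int) : List Int :=
  ((PySem.List.enumerate nums 0).filter (fun p => p.2 == 1)).map (fun p => p.1)

-- [b - a for a, b in zip(pos, pos[1:])]
def get_gaps_alt (nums : List Int) : List Int :=
  ((pvPosB nums).zip (pvPosB nums).tail).map (fun p => p.2 - p.1)

-- ===== PRECONDITION & SPEC =====
def Spec_get_gaps (nums : List Int) (out : List Int) : Prop := out = get_gaps_alt nums
instance (nums : List Int) (out : List Int) : Decidable (Spec_get_gaps nums out) := by unfold Spec_get_gaps; infer_instance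

-- ===== CLAIM (what is proved, stated in full; the proofs are below) =====
def Claim_equal_get_gaps : Prop := ∀ (nums : List Int), Dom_get_gaps nums → Spec_get_gaps nums (get_gaps nums)

-- ===== LEMMAS AND PROOFS =====

-- consecutive differences, recursively
def pvDiffs : List Int → List Int
  | a :: b :: t => (b - a) :: pvDiffs (b :: t)
  | _ => []

-- positions of ones in an enumerated list
def pvPos (l : List (Int × Int)) : List Int :=
  (l.filter (fun p => p.2 == 1)).map (fun p => p.1)

theorem pvDiffs_eq_zip (pos : List Int) :
    (pos.zip pos.tail).map (fun p => p.2 - p.1) = pvDiffs pos := by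
  induction pos with
  | nil => rfl
  | cons a t ih =>
    cases t with
    | nil => rfl
    | cons b t' => simp only [List.tail_cons, List.zip_cons_cons, List.map_cons, pvDiffs]
                   exact congrArg _ ih

theorem pvLoop_some (l : List (Int × Int)) :
    ∀ (gaps : List Int) (p : Int), 0 ≤ p → (∀ q ∈ l, 0 ≤ q.1) →
    (l.foldl pvStepA (gaps, p)).1 = gaps ++ pvDiffs (p :: pvPos l) := by
  induction l with
  | nil => intro gaps p _ _; simp [pvPos, pvDiffs]
  | cons q t ih =>
    intro gaps p hp hl
    have hq : 0 ≤ q.1 := hl q (List.mem_cons_self ..)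
    have ht : ∀ r ∈ t, 0 ≤ r.1 := fun r hr => hl r (List.mem_cons_of_mem _ hr)
    have hpne : (p == -1) = false := by simp; omega
    by_cases hx : q.2 = 1
    · rw [List.foldl_cons,
        show pvStepA (gaps, p) q = (gaps ++ [q.1 - p], q.1) from by
          simp [pvStepA, hpne, hx],
        ih _ q.1 hq ht]
      simp [pvPos, pvDiffs, hx]
    · rw [List.foldl_cons,
        show pvStepA (gaps, p) q = (gaps, p) from by simp [pvStepA, hpne, hx],
        ih _ p hp ht]
      simp [pvPos, hx]

theorem pvLoop_none (l : List (Int × Int)) :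
    ∀ (gaps : List Int), (∀ q ∈ l, 0 ≤ q.1) →
    (l.foldl pvStepA (gaps, -1)).1 = gaps ++ pvDiffs (pvPos l) := by
  induction l with
  | nil => intro gaps _; simp [pvPos, pvDiffs]
  | cons q t ih =>
    intro gaps hl
    have hq : 0 ≤ q.1 := hl q (List.mem_cons_self ..)
    have ht : ∀ r ∈ t, 0 ≤ r.1 := fun r hr => hl r (List.mem_cons_of_mem _ hr)
    by_cases hx : q.2 = 1
    · rw [List.foldl_cons,
        show pvStepA (gaps, -1) q = (gaps, q.1) from by simp [pvStepA, hx],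
        pvLoop_some t _ q.1 hq ht]
      simp [pvPos, hx]
    · rw [List.foldl_cons,
        show pvStepA (gaps, -1) q = (gaps, -1) from by simp [pvStepA, hx],
        ih _ ht]
      simp [pvPos, hx]

-- ===== VERDICT (by name: the statement is the Claim_ definition above) =====
theorem get_gaps_spec : Claim_equal_get_gaps := by
  intro nums _
  unfold Spec_get_gaps get_gaps get_gaps_alt
  have hnn : ∀ q ∈ PySem.List.enumerate nums 0, 0 ≤ q.1 := by
    intro q hq
    rcases (PySem.List.mem_enumerate_iff nums 0 q).1 hq with ⟨k, hk, rfl⟩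
    simp
  rw [pvLoop_none _ [] hnn, List.nil_append, pvDiffs_eq_zip (pvPosB nums)]
  rfl
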